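-- pv_equiv track=rewrite | github.com/jaesoekjjanag/Algorithms | 프로그래머스/level2/heap/더맵게.py | solution
-- ===== SOURCE A (Python) =====
-- import heapq
--
-- def solution(scoville, K):
--     heapq.heapify(scoville)
--     count = 0
--
--     while(scoville[0] < K):
--         if(len(scoville) == 1):
--             return -1
--         count += 1
--         first = heapq.heappop(scoville)
--         second = heapq.heappop(scoville)
--         heapq.heappush(scoville, first + second*2)
--
--     return count
-- ===== SOURCE B (Python) =====
-- def solution(scoville, K):
--     # Sorted-list strategy: keep a fully sorted list (no heap). The two
--     # smallest are always at the front; insert the mix back by linear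
--     # insertion into the sorted remainder. Works on a sorted copy (no
--     # mutation of the caller's list).
--     s = sorted(scoville)
--     count = 0
--     while s[0] < K:
--         if len(s) == 1:
--             return -1
--         new = s[0] + 2 * s[1]
--         rest = s[2:]
--         i = 0
--         while i < len(rest) and rest[i] < new:
--             i += 1
--         s = rest[:i] + [new] + rest[i:]
--         count += 1
--     return count
-- ===== Notes on version B (the rewrite author's own statement) =====
-- stated objective: alternative
-- what changed: Replaces the binary heap (heapify/heappop/heappush) by a fully sorted list: sort once, always take the two front elements, and re-insert the mix at its sorted position by a linear scan; B works on a sorted copy and does not mutate the caller's list (A heapifies it in place).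
-- outside the precondition, e.g. on solution([], 5): A raises IndexError, B raises IndexError
import Mathlib
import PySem

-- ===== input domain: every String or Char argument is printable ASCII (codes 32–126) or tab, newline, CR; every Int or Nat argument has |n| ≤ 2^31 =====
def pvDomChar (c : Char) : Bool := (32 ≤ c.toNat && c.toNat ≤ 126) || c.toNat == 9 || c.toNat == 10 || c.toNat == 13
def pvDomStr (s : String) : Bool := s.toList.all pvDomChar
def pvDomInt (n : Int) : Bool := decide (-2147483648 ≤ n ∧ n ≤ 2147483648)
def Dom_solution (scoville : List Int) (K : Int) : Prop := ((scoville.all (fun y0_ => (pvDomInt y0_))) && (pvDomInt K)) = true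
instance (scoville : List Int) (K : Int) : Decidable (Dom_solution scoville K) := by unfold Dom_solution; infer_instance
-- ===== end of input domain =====

-- B replaces A's binary heap (heapify/heappop/heappush) by one sort plus linear
-- re-insertion into a fully sorted list (objective: alternative). A heapifies the
-- caller's list in place, B does not mutate it: the equivalence proved here is
-- about the return value only. Loops are ported with a structural fuel bound that
-- the wrappers set high enough to be exact (each loop strictly decreases its measure).

-- ===== PORT A =====
-- CPython heapq._siftdown(heap, startpos, pos), newitem = heap[pos] passed explicitly.
-- pos strictly decreases, so fuel = initial pos bounds the loop; at fuel 0 the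
-- invariant pos ≤ fuel forces pos = 0, where Python also writes and stops.
def siftdownGo : Nat → List Int → Nat → Nat → Int → List Int
  | 0, a, _, pos, ni => a.set pos ni
  | fuel + 1, a, st, pos, ni =>
    if st < pos then
      if ni < a.getD ((pos - 1) / 2) 0 then
        siftdownGo fuel (a.set pos (a.getD ((pos - 1) / 2) 0)) st ((pos - 1) / 2) ni
      else a.set pos ni
    else a.set pos ni

def siftdownA (a : List Int) (st pos : Nat) (ni : Int) : List Int :=
  siftdownGo pos a st pos ni

-- CPython heapq._siftup inner while loop (childpos selection inlined in the branches).
-- endpos - pos strictly decreases; at fuel 0 the invariant endpos - pos ≤ fuel means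
-- the loop guard 2*pos+1 < endpos is false, where Python also leaves the loop.
def siftupGo : Nat → List Int → Nat → Nat → Nat → Int → List Int
  | 0, a, _, st, pos, ni => siftdownA (a.set pos ni) st pos ni
  | fuel + 1, a, endpos, st, pos, ni =>
    if 2 * pos + 1 < endpos then
      if 2 * pos + 2 < endpos ∧ ¬ (a.getD (2 * pos + 1) 0 < a.getD (2 * pos + 2) 0) then
        siftupGo fuel (a.set pos (a.getD (2 * pos + 2) 0)) endpos st (2 * pos + 2) ni
      else
        siftupGo fuel (a.set pos (a.getD (2 * pos + 1) 0)) endpos st (2 * pos + 1) ni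
    else siftdownA (a.set pos ni) st pos ni

-- CPython heapq._siftup(heap, pos)
def siftupA (a : List Int) (pos : Nat) : List Int :=
  siftupGo a.length a a.length pos pos (a.getD pos 0)

-- heapq.heapify: for i in reversed(range(n//2)): _siftup(x, i)
def heapifyA (x : List Int) : List Int :=
  (List.range (x.length / 2)).reverse.foldl (fun h i => siftupA h i) x

-- heapq.heappush: heap.append(item); _siftdown(heap, 0, len(heap)-1)
def heappushA (h : List Int) (item : Int) : List Int :=
  siftdownA (h ++ [item]) 0 h.length item

-- heapq.heappop: lastelt = heap.pop(); if heap: returnitem = heap[0]; heap[0] = lastelt;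
-- _siftup(heap, 0); return returnitem; else return lastelt
-- (solution never pops an empty heap; Python would raise IndexError there)
def heappopA (h : List Int) : Int × List Int :=
  if h.dropLast.isEmpty then ((h.getLast?).getD 0, h.dropLast)
  else (h.dropLast.getD 0 0, siftupA (h.dropLast.set 0 ((h.getLast?).getD 0)) 0)

-- A's while loop: each iteration shortens the heap by one, so fuel = initial length
-- is exact; at fuel 0 the invariant forces h = [], the case Python cannot reach
-- under Pre_ (it would raise IndexError on scoville[0]).
def loopAGo : Nat → List Int → Int → Int → Int
  | 0, _, _, _ => -2
  | fuel + 1, h, K, count =>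
    if h = [] then -2   -- unreachable: Python raises IndexError on scoville[0]; Pre_ excludes []
    else if h.getD 0 0 < K then
      if h.length = 1 then -1
      else
        loopAGo fuel (heappushA (heappopA (heappopA h).2).2
          ((heappopA h).1 + (heappopA (heappopA h).2).1 * 2)) K (count + 1)
    else count

def solution (scoville : List Int) (K : Int) : Int :=
  loopAGo scoville.length (heapifyA scoville) K 0

-- ===== PORT B =====
-- the linear scan `i = 0; while i < len(rest) and rest[i] < new: i += 1`;
-- fuel = len(rest) bounds it (i grows by one each pass).
def findGo : Nat → List Int → Int → Nat → Nat
  | 0, _, _, i => i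
  | fuel + 1, rest, x, i =>
    if i < rest.length ∧ rest.getD i 0 < x then findGo fuel rest x (i + 1) else i

def findIdxB (rest : List Int) (x : Int) : Nat :=
  findGo rest.length rest x 0

-- rest[:i] + [new] + rest[i:]  (0 ≤ i ≤ len rest, so take/drop are exact)
def insortB (rest : List Int) (x : Int) : List Int :=
  rest.take (findIdxB rest x) ++ [x] ++ rest.drop (findIdxB rest x)

-- B's while loop, fueled like loopAGo (the list shrinks by one per iteration)
def loopBGo : Nat → List Int → Int → Int → Int
  | 0, _, _, _ => 0
  | fuel + 1, s, K, count =>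
    if s = [] then 0   -- unreachable: Python raises IndexError on s[0]; Pre_ excludes []
    else if s.getD 0 0 < K then
      if s.length = 1 then -1
      else loopBGo fuel (insortB (s.drop 2) (s.getD 0 0 + 2 * s.getD 1 0)) K (count + 1)
    else count

def solution_alt (scoville : List Int) (K : Int) : Int :=
  loopBGo scoville.length (PySem.List.sorted scoville (fun x => x) false) K 0

-- ===== PRECONDITION & SPEC =====
-- Pre_ excludes exactly the empty list, on which Python A raises IndexError at scoville[0].
def Pre_solution (scoville : List Int) (K : Int) : Prop := scoville ≠ []
instance (scoville : List Int) (K : Int) : Decidable (Pre_solution scoville K) := by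
  unfold Pre_solution; infer_instance

def pvWitness_solution : List Int × Int := ([1, 2, 3, 9, 10, 12], 7)

def Spec_solution (scoville : List Int) (K : Int) (out : Int) : Prop := out = solution_alt scoville K
instance (scoville : List Int) (K : Int) (out : Int) : Decidable (Spec_solution scoville K out) := by
  unfold Spec_solution; infer_instance

-- ===== CLAIM (what is proved, stated in full; the proofs are below) =====
def Claim_equal_solution : Prop := ∀ (scoville : List Int) (K : Int), Dom_solution scoville K → Pre_solution scoville K → Spec_solution scoville K (solution scoville K)

-- ===== LEMMAS AND PROOFS =====

-- getD/set helpers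
theorem getD_set_ne (l : List Int) (i j : Nat) (x : Int) (hne : i ≠ j) :
    (l.set i x).getD j 0 = l.getD j 0 := by
  simp [List.getD_eq_getElem?_getD, List.getElem?_set_ne hne]

theorem getD_set_self (l : List Int) (i : Nat) (x : Int) (h : i < l.length) :
    (l.set i x).getD i 0 = x := by
  rw [List.getD_eq_getElem _ _ (by simpa using h)]
  simp

theorem set_getD_id (l : List Int) (i : Nat) (h : i < l.length) :
    l.set i (l.getD i 0) = l := by
  rw [List.getD_eq_getElem _ _ h]; exact List.set_getElem_self h

theorem count_set_aux (l : List Int) (i : Nat) (x y : Int) (hi : i < l.length) :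
    (l.set i x).count y + (if l.getD i 0 = y then 1 else 0)
      = l.count y + (if x = y then 1 else 0) := by
  induction l generalizing i with
  | nil => simp at hi
  | cons a t ih =>
    cases i with
    | zero =>
      simp only [List.set_cons_zero, List.count_cons, List.getD_cons_zero, beq_iff_eq]
      split_ifs <;> simp_all
    | succ j =>
      have hj : j < t.length := by simpa using hi
      simp only [List.set_cons_succ, List.count_cons, List.getD_cons_succ, beq_iff_eq]
      have := ih j hj
      split_ifs at * <;> omega

theorem set_swap_perm (l : List Int) (i j : Nat) (x : Int) (hi : i < l.length)
    (hj : j < l.length) (hne : i ≠ j) :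
    ((l.set i (l.getD j 0)).set j x).Perm (l.set i x) := by
  rw [List.perm_iff_count]
  intro y
  have hj' : j < (l.set i (l.getD j 0)).length := by simpa using hj
  have h1 := count_set_aux (l.set i (l.getD j 0)) j x y hj'
  have h2 := count_set_aux l i (l.getD j 0) y hi
  have h3 := count_set_aux l i x y hi
  have hg : (l.set i (l.getD j 0)).getD j 0 = l.getD j 0 := getD_set_ne l i j _ hne
  rw [hg] at h1
  split_ifs at * <;> omega

-- length lemmas
theorem length_siftdownGo (fuel : Nat) : ∀ (a : List Int) (st pos : Nat) (ni : Int),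
    (siftdownGo fuel a st pos ni).length = a.length := by
  induction fuel with
  | zero => intro a st pos ni; simp [siftdownGo]
  | succ fuel ih =>
    intro a st pos ni
    simp only [siftdownGo]
    split_ifs <;> simp [ih]

theorem length_siftdownA (a : List Int) (st pos : Nat) (ni : Int) :
    (siftdownA a st pos ni).length = a.length := length_siftdownGo pos a st pos ni

theorem length_siftupGo (fuel : Nat) : ∀ (a : List Int) (endpos st pos : Nat) (ni : Int),
    (siftupGo fuel a endpos st pos ni).length = a.length := by
  induction fuel with
  | zero => intro a endpos st pos ni; simp [siftupGo, length_siftdownA]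
  | succ fuel ih =>
    intro a endpos st pos ni
    simp only [siftupGo]
    split_ifs <;> simp [ih, length_siftdownA]

theorem length_siftupA (a : List Int) (pos : Nat) : (siftupA a pos).length = a.length := by
  simp [siftupA, length_siftupGo]

theorem length_heappopA (h : List Int) : (heappopA h).2.length = h.length - 1 := by
  unfold heappopA
  split <;> simp [length_siftupA, List.length_dropLast]

theorem length_heappushA (h : List Int) (x : Int) : (heappushA h x).length = h.length + 1 := by
  simp [heappushA, length_siftdownA]

-- the partial heap property: every parent/child pair whose parent index is ≥ st is ordered
def hpA (a : List Int) (st : Nat) : Prop :=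
  ∀ c, 1 ≤ c → c < a.length → st ≤ (c - 1) / 2 → a.getD ((c - 1) / 2) 0 ≤ a.getD c 0

-- pos lies on the parent chain above st (the shape of every _siftdown call)
def onChain (st pos : Nat) : Prop :=
  if st < pos then onChain st ((pos - 1) / 2) else pos = st
termination_by pos
decreasing_by omega

theorem onChain_le {st pos : Nat} (h : onChain st pos) : st ≤ pos := by
  rw [onChain.eq_def] at h; split at h <;> omega

theorem onChain_zero (pos : Nat) : onChain 0 pos := by
  induction pos using Nat.strong_induction_on with
  | _ pos ih =>
    rw [onChain.eq_def]
    split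
    · exact ih _ (by omega)
    · omega

theorem onChain_step {st pos : Nat} (h1 : st < pos) (h : onChain st pos) :
    onChain st ((pos - 1) / 2) := by
  rw [onChain.eq_def] at h; simpa [h1] using h

theorem onChain_child {st pos c : Nat} (h : onChain st pos) (hc : (c - 1) / 2 = pos)
    (hlt : pos < c) : onChain st c := by
  have hle := onChain_le h
  rw [onChain.eq_def]
  split
  · rw [hc]; exact h
  · omega

-- the two hypothesis shapes threaded through siftdown/siftup
def H2P (st : Nat) (a : List Int) (pos : Nat) : Prop :=
  ∀ c, 1 ≤ c → c < a.length → c ≠ pos → (c - 1) / 2 ≠ pos → st ≤ (c - 1) / 2 →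
    a.getD ((c - 1) / 2) 0 ≤ a.getD c 0

def H3P (st : Nat) (ni : Int) (a : List Int) (pos : Nat) : Prop :=
  ∀ c, 1 ≤ c → c < a.length → (c - 1) / 2 = pos →
    ni ≤ a.getD c 0 ∧ (st < pos → a.getD ((pos - 1) / 2) 0 ≤ a.getD c 0)

def H3U (st : Nat) (a : List Int) (pos : Nat) : Prop :=
  ∀ c, 1 ≤ c → c < a.length → (c - 1) / 2 = pos → st < pos →
    a.getD ((pos - 1) / 2) 0 ≤ a.getD c 0

theorem root_le (a : List Int) (h : hpA a 0) :
    ∀ j, j < a.length → a.getD 0 0 ≤ a.getD j 0 := by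
  intro j
  induction j using Nat.strong_induction_on with
  | _ j ih =>
    intro hj
    rcases Nat.eq_zero_or_pos j with h0 | h0
    · subst h0; exact le_refl _
    · calc a.getD 0 0 ≤ a.getD ((j - 1) / 2) 0 := ih _ (by omega) (by omega)
        _ ≤ a.getD j 0 := h j (by omega) hj (Nat.zero_le _)

-- the two terminal writes of _siftdown restore the (partial) heap property
theorem siftdown_write_done (st : Nat) (ni : Int) (a : List Int) (pos : Nat)
    (hpos : pos < a.length) (h1 : st < pos) (h2 : ¬ ni < a.getD ((pos - 1) / 2) 0)
    (hH2 : H2P st a pos) (hH3 : H3P st ni a pos) : hpA (a.set pos ni) st := by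
  intro c hc1 hclen hcst
  have hclen' : c < a.length := by simpa using hclen
  by_cases hcpos : c = pos
  · subst hcpos
    have hppne : (c - 1) / 2 ≠ c := by omega
    rw [getD_set_ne _ _ _ _ (fun he => hppne he.symm), getD_set_self _ _ _ hpos]
    exact le_of_not_gt h2
  · by_cases hpar : (c - 1) / 2 = pos
    · rw [hpar, getD_set_self _ _ _ hpos, getD_set_ne _ _ _ _ (fun he => hcpos he.symm)]
      exact (hH3 c hc1 hclen' hpar).1
    · rw [getD_set_ne _ _ _ _ (fun he => hpar he.symm),
          getD_set_ne _ _ _ _ (fun he => hcpos he.symm)]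
      exact hH2 c hc1 hclen' hcpos hpar hcst

theorem siftdown_write_start (st : Nat) (ni : Int) (a : List Int) (pos : Nat)
    (hpos : pos < a.length) (h1 : ¬ st < pos) (hch : onChain st pos)
    (hH2 : H2P st a pos) (hH3 : H3P st ni a pos) : hpA (a.set pos ni) st := by
  have hps : pos = st := by have := onChain_le hch; omega
  intro c hc1 hclen hcst
  have hclen' : c < a.length := by simpa using hclen
  by_cases hcpos : c = pos
  · exfalso; omega
  · by_cases hpar : (c - 1) / 2 = pos
    · rw [hpar, getD_set_self _ _ _ hpos, getD_set_ne _ _ _ _ (fun he => hcpos he.symm)]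
      exact (hH3 c hc1 hclen' hpar).1
    · rw [getD_set_ne _ _ _ _ (fun he => hpar he.symm),
          getD_set_ne _ _ _ _ (fun he => hcpos he.symm)]
      exact hH2 c hc1 hclen' hcpos hpar hcst

theorem siftdownGo_spec (fuel : Nat) : ∀ (a : List Int) (st pos : Nat) (ni : Int),
    pos ≤ fuel → pos < a.length → onChain st pos → H2P st a pos → H3P st ni a pos →
    (siftdownGo fuel a st pos ni).length = a.length ∧
      (siftdownGo fuel a st pos ni).Perm (a.set pos ni) ∧ hpA (siftdownGo fuel a st pos ni) st := by
  induction fuel with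
  | zero =>
    intro a st pos ni hfu hpos hch hH2 hH3
    have hp0 : pos = 0 := by omega
    simp only [siftdownGo]
    exact ⟨by simp, List.Perm.refl _,
      siftdown_write_start st ni a pos hpos (by omega) hch hH2 hH3⟩
  | succ fuel ih =>
    intro a st pos ni hfu hpos hch hH2 hH3
    simp only [siftdownGo]
    by_cases h1 : st < pos
    · rw [if_pos h1]
      by_cases h2 : ni < a.getD ((pos - 1) / 2) 0
      · rw [if_pos h2]
        have hpplt : (pos - 1) / 2 < pos := by omega
        have hpplen : (pos - 1) / 2 < a.length := by omega
        have hch' : onChain st ((pos - 1) / 2) := onChain_step h1 hch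
        have hstpp : st ≤ (pos - 1) / 2 := onChain_le hch'
        have hH2' : H2P st (a.set pos (a.getD ((pos - 1) / 2) 0)) ((pos - 1) / 2) := by
          intro c hc1 hclen hcp hcpp hcst
          have hclen' : c < a.length := by simpa using hclen
          by_cases hcpos : c = pos
          · exact absurd (by rw [hcpos]) hcpp
          · by_cases hpar : (c - 1) / 2 = pos
            · rw [hpar, getD_set_self _ _ _ hpos, getD_set_ne _ _ _ _ (fun he => hcpos he.symm)]
              exact (hH3 c hc1 hclen' hpar).2 h1
            · rw [getD_set_ne _ _ _ _ (fun he => hpar he.symm),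
                  getD_set_ne _ _ _ _ (fun he => hcpos he.symm)]
              exact hH2 c hc1 hclen' hcpos hpar hcst
        have hH3' : H3P st ni (a.set pos (a.getD ((pos - 1) / 2) 0)) ((pos - 1) / 2) := by
          intro c hc1 hclen hpar
          have hclen' : c < a.length := by simpa using hclen
          have hgp : ∀ _ : st < (pos - 1) / 2,
              a.getD (((pos - 1) / 2 - 1) / 2) 0 ≤ a.getD ((pos - 1) / 2) 0 := by
            intro hstpp'
            have hc1' : onChain st (((pos - 1) / 2 - 1) / 2) := onChain_step hstpp' hch'
            exact hH2 ((pos - 1) / 2) (by omega) hpplen (by omega) (by omega) (onChain_le hc1')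
          have hsetgp : ∀ _ : st < (pos - 1) / 2,
              (a.set pos (a.getD ((pos - 1) / 2) 0)).getD (((pos - 1) / 2 - 1) / 2) 0
                = a.getD (((pos - 1) / 2 - 1) / 2) 0 := by
            intro hstpp'
            exact getD_set_ne _ _ _ _ (by omega)
          by_cases hcpos : c = pos
          · rw [hcpos, getD_set_self _ _ _ hpos]
            refine ⟨le_of_lt h2, ?_⟩
            intro hstpp'
            rw [hsetgp hstpp']
            exact hgp hstpp'
          · rw [getD_set_ne _ _ _ _ (fun he => hcpos he.symm)]
            have hPar : a.getD ((c - 1) / 2) 0 ≤ a.getD c 0 := by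
              exact hH2 c hc1 hclen' hcpos (by omega) (by rw [hpar]; exact hstpp)
            rw [hpar] at hPar
            constructor
            · exact le_trans (le_of_lt h2) hPar
            · intro hstpp'
              rw [hsetgp hstpp']
              exact le_trans (hgp hstpp') hPar
        obtain ⟨L, P, H⟩ := ih (a.set pos (a.getD ((pos - 1) / 2) 0)) st ((pos - 1) / 2) ni
          (by omega) (by simpa using hpplen) hch' hH2' hH3'
        refine ⟨by simpa using L, ?_, H⟩
        exact P.trans (set_swap_perm a pos ((pos - 1) / 2) ni hpos hpplen (by omega))
      · rw [if_neg h2]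
        exact ⟨by simp, List.Perm.refl _,
          siftdown_write_done st ni a pos hpos h1 h2 hH2 hH3⟩
    · rw [if_neg h1]
      exact ⟨by simp, List.Perm.refl _,
        siftdown_write_start st ni a pos hpos h1 hch hH2 hH3⟩

theorem siftdown_spec (a : List Int) (st pos : Nat) (ni : Int)
    (hpos : pos < a.length) (hch : onChain st pos) (hH2 : H2P st a pos)
    (hH3 : H3P st ni a pos) :
    (siftdownA a st pos ni).length = a.length ∧
      (siftdownA a st pos ni).Perm (a.set pos ni) ∧ hpA (siftdownA a st pos ni) st :=
  siftdownGo_spec pos a st pos ni (le_refl _) hpos hch hH2 hH3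

-- one hole-descending step of _siftup preserves the two hypothesis shapes
theorem siftup_step (st : Nat) (a : List Int) (pos cp : Nat)
    (hpos : pos < a.length) (hcplen : cp < a.length)
    (hcp : (cp - 1) / 2 = pos) (hlt : pos < cp)
    (hch : onChain st pos) (hH2 : H2P st a pos) (hH3 : H3U st a pos)
    (hmin : ∀ c, 1 ≤ c → c < a.length → (c - 1) / 2 = pos → c ≠ cp →
      a.getD cp 0 ≤ a.getD c 0) :
    onChain st cp ∧ H2P st (a.set pos (a.getD cp 0)) cp ∧
      H3U st (a.set pos (a.getD cp 0)) cp := by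
  refine ⟨onChain_child hch hcp hlt, ?_, ?_⟩
  · intro c hc1 hclen hcne hcpne hcst
    have hclen' : c < a.length := by simpa using hclen
    by_cases hcpos : c = pos
    · subst hcpos
      by_cases hp0 : (c - 1) / 2 = c
      · rw [hp0]
      · rw [getD_set_ne _ _ _ _ (fun he => hp0 he.symm), getD_set_self _ _ _ hpos]
        exact hH3 cp (by omega) hcplen hcp (by omega)
    · by_cases hpar : (c - 1) / 2 = pos
      · rw [hpar, getD_set_self _ _ _ hpos, getD_set_ne _ _ _ _ (fun he => hcpos he.symm)]
        exact hmin c hc1 hclen' hpar hcne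
      · rw [getD_set_ne _ _ _ _ (fun he => hpar he.symm),
            getD_set_ne _ _ _ _ (fun he => hcpos he.symm)]
        exact hH2 c hc1 hclen' hcpos hpar hcst
  · intro c hc1 hclen hpar _
    have hclen' : c < a.length := by simpa using hclen
    have hcne : c ≠ pos := by omega
    rw [hcp, getD_set_self _ _ _ hpos, getD_set_ne _ _ _ _ (fun he => hcne he.symm)]
    have := hH2 c hc1 hclen' hcne (by omega) (by rw [hpar]; omega)
    rwa [hpar] at this

-- the loop-exit call of _siftup (hole is a leaf): hand to _siftdown
theorem siftup_exit (st : Nat) (ni : Int) (a : List Int) (endpos pos : Nat)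
    (he : endpos = a.length) (hpos : pos < a.length) (hnc : ¬ 2 * pos + 1 < endpos)
    (hch : onChain st pos) (hH2 : H2P st a pos) :
    (siftdownA (a.set pos ni) st pos ni).length = a.length ∧
      (siftdownA (a.set pos ni) st pos ni).Perm (a.set pos ni) ∧
      hpA (siftdownA (a.set pos ni) st pos ni) st := by
  have hH2' : H2P st (a.set pos ni) pos := by
    intro c hc1 hclen hcne hcpne hcst
    have hclen' : c < a.length := by simpa using hclen
    rw [getD_set_ne _ _ _ _ (fun he' => hcpne he'.symm),
        getD_set_ne _ _ _ _ (fun he' => hcne he'.symm)]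
    exact hH2 c hc1 hclen' hcne hcpne hcst
  have hH3' : H3P st ni (a.set pos ni) pos := by
    intro c hc1 hclen hpar
    exfalso
    have : c < a.length := by simpa using hclen
    omega
  obtain ⟨L, P, H⟩ := siftdown_spec (a.set pos ni) st pos ni (by simpa using hpos) hch hH2' hH3'
  refine ⟨by simpa using L, ?_, H⟩
  calc (siftdownA (a.set pos ni) st pos ni).Perm ((a.set pos ni).set pos ni) := P
    _ = a.set pos ni := by rw [List.set_set]

theorem siftupGo_spec (fuel : Nat) : ∀ (a : List Int) (endpos st pos : Nat) (ni : Int),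
    endpos - pos ≤ fuel → endpos = a.length → pos < a.length → onChain st pos →
    H2P st a pos → H3U st a pos →
    (siftupGo fuel a endpos st pos ni).length = a.length ∧
      (siftupGo fuel a endpos st pos ni).Perm (a.set pos ni) ∧
      hpA (siftupGo fuel a endpos st pos ni) st := by
  induction fuel with
  | zero =>
    intro a endpos st pos ni hfu he hpos hch hH2 hH3
    simp only [siftupGo]
    exact siftup_exit st ni a endpos pos he hpos (by omega) hch hH2
  | succ fuel ih =>
    intro a endpos st pos ni hfu he hpos hch hH2 hH3
    simp only [siftupGo]
    by_cases h1 : 2 * pos + 1 < endpos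
    · rw [if_pos h1]
      by_cases h2 : 2 * pos + 2 < endpos ∧ ¬ (a.getD (2 * pos + 1) 0 < a.getD (2 * pos + 2) 0)
      · rw [if_pos h2]
        have hcplen : 2 * pos + 2 < a.length := by omega
        have hmin : ∀ c, 1 ≤ c → c < a.length → (c - 1) / 2 = pos → c ≠ 2 * pos + 2 →
            a.getD (2 * pos + 2) 0 ≤ a.getD c 0 := by
          intro c _ _ hpc hne
          have : c = 2 * pos + 1 := by omega
          subst this
          exact le_of_not_gt (fun hlt => h2.2 hlt)
        obtain ⟨hch', hH2', hH3'⟩ := siftup_step st a pos (2 * pos + 2) hpos hcplen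
          (by omega) (by omega) hch hH2 hH3 hmin
        obtain ⟨L, P, H⟩ := ih _ endpos st (2 * pos + 2) ni (by omega) (by simpa using he)
          (by simpa using hcplen) hch' hH2' hH3'
        refine ⟨by simpa using L, ?_, H⟩
        exact P.trans (set_swap_perm a pos (2 * pos + 2) ni hpos hcplen (by omega))
      · rw [if_neg h2]
        have hcplen : 2 * pos + 1 < a.length := by omega
        have hmin : ∀ c, 1 ≤ c → c < a.length → (c - 1) / 2 = pos → c ≠ 2 * pos + 1 →
            a.getD (2 * pos + 1) 0 ≤ a.getD c 0 := by
          intro c _ hclen hpc hne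
          have hc2 : c = 2 * pos + 2 := by omega
          subst hc2
          have h2' : 2 * pos + 2 < endpos → a.getD (2 * pos + 1) 0 < a.getD (2 * pos + 2) 0 := by
            by_cases hlt : a.getD (2 * pos + 1) 0 < a.getD (2 * pos + 2) 0
            · exact fun _ => hlt
            · exact fun hin => absurd ⟨hin, hlt⟩ h2
          exact le_of_lt (h2' (by omega))
        obtain ⟨hch', hH2', hH3'⟩ := siftup_step st a pos (2 * pos + 1) hpos hcplen
          (by omega) (by omega) hch hH2 hH3 hmin
        obtain ⟨L, P, H⟩ := ih _ endpos st (2 * pos + 1) ni (by omega) (by simpa using he)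
          (by simpa using hcplen) hch' hH2' hH3'
        refine ⟨by simpa using L, ?_, H⟩
        exact P.trans (set_swap_perm a pos (2 * pos + 1) ni hpos hcplen (by omega))
    · rw [if_neg h1]
      exact siftup_exit st ni a endpos pos he hpos h1 hch hH2

theorem siftup_spec (a : List Int) (pos : Nat) (hpos : pos < a.length)
    (h : ∀ c, 1 ≤ c → c < a.length → pos + 1 ≤ (c - 1) / 2 →
      a.getD ((c - 1) / 2) 0 ≤ a.getD c 0) :
    (siftupA a pos).length = a.length ∧ (siftupA a pos).Perm a ∧ hpA (siftupA a pos) pos := by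
  have hch : onChain pos pos := by rw [onChain.eq_def]; simp
  have hH2 : H2P pos a pos := by
    intro c hc1 hclen hcne hcpne hcst
    exact h c hc1 hclen (by omega)
  have hH3 : H3U pos a pos := by
    intro c _ _ _ hlt
    exact absurd hlt (lt_irrefl pos)
  obtain ⟨L, P, H⟩ := siftupGo_spec a.length a a.length pos pos (a.getD pos 0)
    (by omega) rfl hpos hch hH2 hH3
  rw [set_getD_id a pos hpos] at P
  exact ⟨L, P, H⟩

theorem heapify_aux (i : Nat) : ∀ a : List Int, i ≤ a.length / 2 → hpA a i →
    ((List.range i).reverse.foldl (fun h j => siftupA h j) a).length = a.length ∧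
      ((List.range i).reverse.foldl (fun h j => siftupA h j) a).Perm a ∧
      hpA ((List.range i).reverse.foldl (fun h j => siftupA h j) a) 0 := by
  induction i with
  | zero => intro a _ h; exact ⟨rfl, List.Perm.refl a, h⟩
  | succ i ihi =>
    intro a hle hhp
    rw [List.range_succ]
    simp only [List.reverse_append, List.reverse_singleton, List.singleton_append, List.foldl_cons]
    have hilen : i < a.length := by omega
    obtain ⟨L, P, H⟩ := siftup_spec a i hilen (fun c hc1 hc2 hc3 => hhp c hc1 hc2 hc3)
    obtain ⟨L2, P2, H2⟩ := ihi (siftupA a i) (by omega) H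
    exact ⟨L2.trans L, P2.trans P, H2⟩

theorem heapify_spec (x : List Int) :
    (heapifyA x).length = x.length ∧ (heapifyA x).Perm x ∧ hpA (heapifyA x) 0 := by
  have h0 : hpA x (x.length / 2) := by
    intro c hc1 hc2 hc3
    exfalso; omega
  exact heapify_aux (x.length / 2) x le_rfl h0

theorem heappush_spec (h : List Int) (x : Int) (hh : hpA h 0) :
    (heappushA h x).Perm (x :: h) ∧ hpA (heappushA h x) 0 := by
  unfold heappushA
  have hpos : h.length < (h ++ [x]).length := by simp
  have hH2 : H2P 0 (h ++ [x]) h.length := by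
    intro c hc1 hclen hcne hcpne _
    have hc : c < h.length := by simp at hclen; omega
    have hp : (c - 1) / 2 < h.length := by omega
    rw [List.getD_append _ _ _ _ hp, List.getD_append _ _ _ _ hc]
    exact hh c hc1 hc (Nat.zero_le _)
  have hH3 : H3P 0 x (h ++ [x]) h.length := by
    intro c hc1 hclen hpar
    exfalso
    have : c < h.length + 1 := by simpa using hclen
    omega
  obtain ⟨L, P, H⟩ := siftdown_spec (h ++ [x]) 0 h.length x hpos (onChain_zero _) hH2 hH3
  have hset : (h ++ [x]).set h.length x = h ++ [x] := by
    have hgd : (h ++ [x]).getD h.length 0 = x := by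
      rw [List.getD_eq_getElem _ _ (by simp)]
      simp
    have := set_getD_id (h ++ [x]) h.length (by simp)
    rwa [hgd] at this
  rw [hset] at P
  exact ⟨P.trans (List.perm_append_singleton x h), H⟩

theorem getD_dropLast (l : List Int) (i : Nat) (h : i < l.length - 1) :
    l.dropLast.getD i 0 = l.getD i 0 := by
  have h1 : i < l.dropLast.length := by simpa using h
  have h2 : i < l.length := by omega
  rw [List.getD_eq_getElem _ _ h1, List.getD_eq_getElem _ _ h2, List.getElem_dropLast]

theorem heappop_spec (h : List Int) (hne : h ≠ []) (hh : hpA h 0) :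
    (heappopA h).1 = h.getD 0 0 ∧ ((heappopA h).1 :: (heappopA h).2).Perm h ∧
      hpA (heappopA h).2 0 := by
  unfold heappopA
  by_cases hd : h.dropLast.isEmpty
  · simp only [if_pos hd]
    have hnil : h.dropLast = [] := List.isEmpty_iff.mp hd
    have hlen1 : h.length = 1 := by
      have := congrArg List.length hnil
      simp at this
      have : h.length ≠ 0 := fun hz => hne (List.length_eq_zero_iff.mp hz)
      omega
    obtain ⟨v, rfl⟩ := List.length_eq_one_iff.mp hlen1
    refine ⟨by simp, by simp [hnil], ?_⟩
    intro c hc1 hc2 _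
    exfalso
    rw [hnil] at hc2
    simp at hc2
  · simp only [if_neg hd]
    have hrne : h.dropLast ≠ [] := fun hz => hd (by simp [hz])
    have hlen2 : 2 ≤ h.length := by
      have : h.dropLast.length ≠ 0 := fun hz => hrne (List.length_eq_zero_iff.mp hz)
      simp at this
      omega
    have hlast : h.getLast?.getD 0 = h.getLast hne := by
      rw [List.getLast?_eq_some_getLast hne]
      rfl
    have hpos0 : 0 < (h.dropLast.set 0 (h.getLast?.getD 0)).length := by
      simp
      omega
    have hpre : ∀ c, 1 ≤ c → c < (h.dropLast.set 0 (h.getLast?.getD 0)).length →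
        0 + 1 ≤ (c - 1) / 2 →
        (h.dropLast.set 0 (h.getLast?.getD 0)).getD ((c - 1) / 2) 0 ≤
          (h.dropLast.set 0 (h.getLast?.getD 0)).getD c 0 := by
      intro c hc1 hclen hcp
      have hclen' : c < h.length - 1 := by simpa using hclen
      have hcne : (0 : Nat) ≠ c := by omega
      have hppne : (0 : Nat) ≠ (c - 1) / 2 := by omega
      rw [getD_set_ne _ _ _ _ hppne, getD_set_ne _ _ _ _ hcne,
          getD_dropLast h _ (by omega), getD_dropLast h _ hclen']
      exact hh c hc1 (by omega) (Nat.zero_le _)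
    obtain ⟨L, P, H⟩ := siftup_spec (h.dropLast.set 0 (h.getLast?.getD 0)) 0 hpos0 hpre
    obtain ⟨r0, t, hrt⟩ := List.exists_cons_of_ne_nil hrne
    have hget0 : h.dropLast.getD 0 0 = h.getD 0 0 := getD_dropLast h 0 (by omega)
    refine ⟨hget0, ?_, H⟩
    have hset : h.dropLast.set 0 (h.getLast?.getD 0) = (h.getLast?.getD 0) :: t := by
      rw [hrt]; rfl
    have hSe : h.dropLast.set 0 (h.getLast?.getD 0) = h.getLast hne :: t := by
      rw [hset, hlast]
    have hP' : (siftupA (h.dropLast.set 0 (h.getLast?.getD 0)) 0).Perm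
        (h.getLast hne :: t) := by
      refine P.trans ?_
      rw [hSe]
    have hr0 : h.dropLast.getD 0 0 = r0 := by rw [hrt]; rfl
    have hh2 : h = r0 :: (t ++ [h.getLast hne]) := by
      conv_lhs => rw [← List.dropLast_append_getLast hne]
      rw [hrt]
      rfl
    have hfin : (h.dropLast.getD 0 0 :: siftupA (h.dropLast.set 0 (h.getLast?.getD 0)) 0).Perm
        (r0 :: (t ++ [h.getLast hne])) := by
      rw [hr0]
      exact List.Perm.cons _ (hP'.trans (List.perm_append_singleton _ _).symm)
    exact hfin.trans (List.Perm.of_eq hh2.symm)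

-- B-side lemmas
theorem findGo_below (fuel : Nat) : ∀ (rest : List Int) (x : Int) (i : Nat),
    rest.length - i ≤ fuel →
    ∀ j, i ≤ j → j < findGo fuel rest x i → rest.getD j 0 < x := by
  induction fuel with
  | zero =>
    intro rest x i hfu j hij hjk
    simp only [findGo] at hjk
    omega
  | succ fuel ih =>
    intro rest x i hfu j hij hjk
    simp only [findGo] at hjk
    split_ifs at hjk with h
    · by_cases hji : j = i
      · subst hji; exact h.2
      · exact ih rest x (i + 1) (by omega) j (by omega) hjk
    · omega

theorem findGo_at (fuel : Nat) : ∀ (rest : List Int) (x : Int) (i : Nat),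
    rest.length - i ≤ fuel →
    findGo fuel rest x i < rest.length → ¬ rest.getD (findGo fuel rest x i) 0 < x := by
  induction fuel with
  | zero =>
    intro rest x i hfu hlt
    simp only [findGo] at hlt ⊢
    omega
  | succ fuel ih =>
    intro rest x i hfu hlt
    simp only [findGo] at hlt ⊢
    split_ifs at hlt ⊢ with h
    · exact ih rest x (i + 1) (by omega) hlt
    · exact fun hx => h ⟨hlt, hx⟩

theorem findIdxB_below (rest : List Int) (x : Int) :
    ∀ j, j < findIdxB rest x → rest.getD j 0 < x :=
  fun j hj => findGo_below rest.length rest x 0 (by omega) j (Nat.zero_le _) hj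

theorem findIdxB_at (rest : List Int) (x : Int) :
    findIdxB rest x < rest.length → ¬ rest.getD (findIdxB rest x) 0 < x :=
  findGo_at rest.length rest x 0 (by omega)

theorem insortB_perm (rest : List Int) (x : Int) : (insortB rest x).Perm (x :: rest) := by
  unfold insortB
  rw [List.append_assoc, List.singleton_append]
  have h1 : (rest.take (findIdxB rest x) ++ x :: rest.drop (findIdxB rest x)).Perm
      (x :: (rest.take (findIdxB rest x) ++ rest.drop (findIdxB rest x))) :=
    List.perm_middle
  rwa [List.take_append_drop] at h1

theorem insortB_sorted (rest : List Int) (x : Int) (hs : rest.Pairwise (· ≤ ·)) :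
    (insortB rest x).Pairwise (· ≤ ·) := by
  unfold insortB
  rw [List.append_assoc, List.singleton_append, List.pairwise_append]
  have hmono := List.pairwise_iff_getElem.mp hs
  have htake : ∀ y ∈ rest.take (findIdxB rest x), y < x := by
    intro y hy
    obtain ⟨j, hj, rfl⟩ := List.getElem_of_mem hy
    have hjk : j < findIdxB rest x := by
      have := hj; simp [List.length_take] at this; omega
    have hjlen : j < rest.length := by
      have := hj; simp [List.length_take] at this; omega
    rw [List.getElem_take]
    have := findIdxB_below rest x j hjk
    rwa [List.getD_eq_getElem _ _ hjlen] at this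
  have hdrop : ∀ y ∈ rest.drop (findIdxB rest x), x ≤ y := by
    intro y hy
    obtain ⟨m, hm, rfl⟩ := List.getElem_of_mem hy
    have hmlen : findIdxB rest x + m < rest.length := by
      have := hm; simp [List.length_drop] at this; omega
    rw [List.getElem_drop]
    have hk : findIdxB rest x < rest.length := by omega
    have hxk : x ≤ rest.getD (findIdxB rest x) 0 := le_of_not_gt (findIdxB_at rest x hk)
    rw [List.getD_eq_getElem _ _ hk] at hxk
    rcases Nat.eq_zero_or_pos m with hm0 | hm0
    · subst hm0; simpa using hxk
    · exact le_trans hxk (hmono _ _ hk hmlen (by omega))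
  refine ⟨List.Pairwise.sublist (List.take_sublist _ _) hs, ?_, ?_⟩
  · rw [List.pairwise_cons]
    exact ⟨hdrop, List.Pairwise.sublist (List.drop_sublist _ _) hs⟩
  · intro a ha b hb
    rcases List.mem_cons.mp hb with rfl | hb'
    · exact le_of_lt (htake a ha)
    · exact le_trans (le_of_lt (htake a ha)) (hdrop b hb')

theorem sorted_head_min (s : List Int) (hs : s.Pairwise (· ≤ ·)) :
    ∀ y ∈ s, s.getD 0 0 ≤ y := by
  cases s with
  | nil => intro y hy; simp at hy
  | cons a t =>
    intro y hy
    rcases List.mem_cons.mp hy with rfl | hy'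
    · exact le_refl _
    · exact (List.pairwise_cons.mp hs).1 y hy'

theorem head_eq_of_perm (h s : List Int) (hne : h ≠ []) (hperm : h.Perm s)
    (hheap : hpA h 0) (hsort : s.Pairwise (· ≤ ·)) : h.getD 0 0 = s.getD 0 0 := by
  have hhl : 0 < h.length := by
    have : h.length ≠ 0 := fun hz => hne (List.length_eq_zero_iff.mp hz)
    omega
  have hsl : 0 < s.length := by rw [← hperm.length_eq]; omega
  have hmemh : h.getD 0 0 ∈ h := by
    rw [List.getD_eq_getElem _ _ hhl]; exact List.getElem_mem _
  have hmems : s.getD 0 0 ∈ s := by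
    rw [List.getD_eq_getElem _ _ hsl]; exact List.getElem_mem _
  have h1 : s.getD 0 0 ≤ h.getD 0 0 := sorted_head_min s hsort _ (hperm.subset hmemh)
  have h2 : h.getD 0 0 ≤ s.getD 0 0 := by
    obtain ⟨j, hj, hjv⟩ := List.getElem_of_mem (hperm.symm.subset hmems)
    calc h.getD 0 0 ≤ h.getD j 0 := root_le h hheap j hj
      _ = s.getD 0 0 := by rw [List.getD_eq_getElem _ _ hj, hjv]
  exact le_antisymm h2 h1

theorem loop_eq (fuel : Nat) : ∀ (h s : List Int) (K count : Int), h.length ≤ fuel →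
    h ≠ [] → h.Perm s → hpA h 0 → s.Pairwise (· ≤ ·) →
    loopAGo fuel h K count = loopBGo fuel s K count := by
  induction fuel with
  | zero =>
    intro h s K count hlen hne _ _ _
    exfalso
    have : h.length ≠ 0 := fun hz => hne (List.length_eq_zero_iff.mp hz)
    omega
  | succ fuel ih =>
    intro h s K count hlen hne hperm hheap hsort
    have hsne : s ≠ [] := by
      intro hz; subst hz
      exact hne (List.Perm.eq_nil hperm)
    have hlens : h.length = s.length := hperm.length_eq
    have hhead : h.getD 0 0 = s.getD 0 0 := head_eq_of_perm h s hne hperm hheap hsort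
    simp only [loopAGo, loopBGo]
    rw [if_neg hne, if_neg hsne, hhead, hlens]
    by_cases hK : s.getD 0 0 < K
    · rw [if_pos hK, if_pos hK]
      by_cases hl1 : s.length = 1
      · rw [if_pos hl1, if_pos hl1]
      · rw [if_neg hl1, if_neg hl1]
        have hslen2 : 2 ≤ s.length := by
          have : s.length ≠ 0 := fun hz => hsne (List.length_eq_zero_iff.mp hz)
          omega
        obtain ⟨s0, s'⟩ : ∃ s0 s', s = s0 :: s' := by
          cases s with
          | nil => exact absurd rfl hsne
          | cons a t => exact ⟨a, t, rfl⟩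
        obtain ⟨s', hs'⟩ := s'
        subst hs'
        obtain ⟨s1, s2, rfl⟩ : ∃ s1 s2, s' = s1 :: s2 := by
          cases s' with
          | nil => simp at hslen2
          | cons a t => exact ⟨a, t, rfl⟩
        obtain ⟨hf, hp1, hh1⟩ := heappop_spec h hne hheap
        have hf' : (heappopA h).1 = s0 := by rw [hf, hhead]; rfl
        have hlen1 : (heappopA h).2.length = h.length - 1 := length_heappopA h
        have h1ne : (heappopA h).2 ≠ [] := by
          intro hz
          rw [hz] at hlen1
          simp at hlen1
          omega
        have hperm1 : (heappopA h).2.Perm (s1 :: s2) := by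
          have : ((heappopA h).1 :: (heappopA h).2).Perm (s0 :: s1 :: s2) := hp1.trans hperm
          rw [hf'] at this
          exact this.cons_inv
        have hsort1 : (s1 :: s2).Pairwise (· ≤ ·) := (List.pairwise_cons.mp hsort).2
        obtain ⟨hf2, hp2, hh2⟩ := heappop_spec (heappopA h).2 h1ne hh1
        have hf2' : (heappopA (heappopA h).2).1 = s1 := by
          rw [hf2, head_eq_of_perm _ _ h1ne hperm1 hh1 hsort1]; rfl
        have hperm2 : (heappopA (heappopA h).2).2.Perm s2 := by
          have : ((heappopA (heappopA h).2).1 :: (heappopA (heappopA h).2).2).Perm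
              (s1 :: s2) := hp2.trans hperm1
          rw [hf2'] at this
          exact this.cons_inv
        have hsort2 : s2.Pairwise (· ≤ ·) := (List.pairwise_cons.mp hsort1).2
        obtain ⟨hp3, hh3⟩ := heappush_spec (heappopA (heappopA h).2).2
          ((heappopA h).1 + (heappopA (heappopA h).2).1 * 2) hh2
        have hval : (heappopA h).1 + (heappopA (heappopA h).2).1 * 2 = s0 + 2 * s1 := by
          rw [hf', hf2']; ring
        simp only [List.getD_cons_zero, List.getD_cons_succ, List.drop_succ_cons,
          List.drop_zero]
        have hlen3 : (heappushA (heappopA (heappopA h).2).2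
            ((heappopA h).1 + (heappopA (heappopA h).2).1 * 2)).length = h.length - 1 := by
          rw [length_heappushA, length_heappopA, length_heappopA]
          have : 2 ≤ h.length := by rw [hlens]; simpa using hslen2
          omega
        have hne3 : (heappushA (heappopA (heappopA h).2).2
            ((heappopA h).1 + (heappopA (heappopA h).2).1 * 2)) ≠ [] := by
          intro hz
          have := congrArg List.length hz
          rw [length_heappushA] at this
          simp at this
        have hperm3 : (heappushA (heappopA (heappopA h).2).2
            ((heappopA h).1 + (heappopA (heappopA h).2).1 * 2)).Perm
            (insortB s2 (s0 + 2 * s1)) := by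
          have hstep := hp3.trans (List.Perm.cons _ hperm2)
          exact (hstep.trans (List.Perm.of_eq (by rw [hval]))).trans
            (insortB_perm s2 (s0 + 2 * s1)).symm
        have hsort3 : (insortB s2 (s0 + 2 * s1)).Pairwise (· ≤ ·) :=
          insortB_sorted s2 (s0 + 2 * s1) hsort2
        refine ih _ _ K (count + 1) ?_ hne3 hperm3 hh3 hsort3
        rw [hlen3]
        omega
    · rw [if_neg hK, if_neg hK]

-- ===== VERDICT (by name: the statement is the Claim_ definition above) =====
theorem solution_spec : Claim_equal_solution := by
  intro scoville K _ hpre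
  unfold Spec_solution solution solution_alt
  obtain ⟨hlen, hperm, hheap⟩ := heapify_spec scoville
  have hsp : (PySem.List.sorted scoville (fun x => x) false).Perm scoville :=
    PySem.List.sorted_perm scoville (fun x => x) false
  have hspw : (PySem.List.sorted scoville (fun x => x) false).Pairwise (· ≤ ·) := by
    have := PySem.List.sorted_pairwise (xs := scoville) (key := fun x => x)
    simpa using this
  refine loop_eq scoville.length _ _ K 0 (by rw [hlen]) ?_ (hperm.trans hsp.symm) hheap hspw
  intro hnil
  have := congrArg List.length hnil
  rw [hlen] at this
  simp at this
  exact hpre this
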